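-- pv_equiv track=rewrite | github.com/walternascimentobarroso/office | src/core/tax_id_format_pt.py | format_pt_tax_id
-- ===== SOURCE A (Python) =====
-- def format_pt_tax_id(value: object) -> object:
--     """Return tax ID with a dot every three digits; non-digit characters are stripped first."""
--
--     if value is None:
--         return None
--     digits = "".join(c for c in str(value).strip() if c.isdigit())
--     if not digits:
--         return value
--     groups: list[str] = []
--     rest = digits
--     while rest:
--         groups.append(rest[-3:])
--         rest = rest[:-3]
--     return ".".join(reversed(groups))
-- ===== SOURCE B (Python) =====
-- def format_pt_tax_id(value: object) -> object:
--     """Return tax ID with a dot every three digits; non-digit characters are stripped first."""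
--
--     if value is None:
--         return None
--     digits = "".join(c for c in str(value).strip() if c.isdigit())
--     if not digits:
--         return value
--     n = len(digits)
--     out = []
--     for i, c in enumerate(digits):
--         if i and (n - i) % 3 == 0:
--             out.append('.')
--         out.append(c)
--     return "".join(out)
-- ===== Notes on version B (the rewrite author's own statement) =====
-- stated objective: alternative
-- what changed: A chunks the digit string from the right in a while loop with repeated slicing, then reverses and joins the chunks; B makes a single left-to-right pass over the digit characters, inserting a dot before each position i > 0 where (n - i) % 3 == 0.
import Mathlib
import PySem

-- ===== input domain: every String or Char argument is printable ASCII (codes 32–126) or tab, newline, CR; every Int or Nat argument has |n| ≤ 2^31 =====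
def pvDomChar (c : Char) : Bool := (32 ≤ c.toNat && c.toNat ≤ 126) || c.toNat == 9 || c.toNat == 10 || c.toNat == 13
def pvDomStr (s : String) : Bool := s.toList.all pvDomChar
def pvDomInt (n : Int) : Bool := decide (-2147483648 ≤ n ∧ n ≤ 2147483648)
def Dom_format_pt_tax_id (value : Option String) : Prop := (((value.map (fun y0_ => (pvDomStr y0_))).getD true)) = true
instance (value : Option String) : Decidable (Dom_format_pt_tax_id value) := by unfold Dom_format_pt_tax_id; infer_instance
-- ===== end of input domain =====

-- B replaces A's right-to-left chunk/reverse/join loop by a single left-to-right pass over the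
-- digit characters that inserts a dot before positions i > 0 with (n - i) % 3 == 0 (objective: alternative).

-- ===== PORT A =====
-- the while loop: groups.append(rest[-3:]); rest = rest[:-3]
-- rest[-3:] = rest.drop (rest.length - 3) and rest[:-3] = rest.take (rest.length - 3),
-- exact by PySem.List.slice_from_neg_ofNat / slice_to_neg_ofNat (clamped Nat subtraction matches Python's clamping).
def fptGroups (rest : List Char) : List (List Char) :=
  if h : rest = [] then []
  else rest.drop (rest.length - 3) :: fptGroups (rest.take (rest.length - 3))
termination_by rest.length
decreasing_by
  have : rest.length ≠ 0 := fun hz => h (List.eq_nil_of_length_eq_zero hz)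
  simp [List.length_take]; omega

def format_pt_tax_id (value : Option String) : Option String :=
  match value with
  | none => none
  | some v =>
    -- digits = "".join(c for c in str(value).strip() if c.isdigit())
    let digits := (PySem.Str.strip v).toList.filter PySem.Chars.isdigit
    if digits = [] then some v
    else
      -- ".".join(reversed(groups))
      some (String.ofList (PySem.Chars.join ['.'] (fptGroups digits).reverse))

-- ===== PORT B =====
def format_pt_tax_id_alt (value : Option String) : Option String :=
  match value with
  | none => none
  | some v =>
    let digits := (PySem.Str.strip v).toList.filter PySem.Chars.isdigit
    if digits = [] then some v
    else
      let n : Int := digits.length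
      -- for i, c in enumerate(digits): if i and (n - i) % 3 == 0: out.append('.'); out.append(c)
      let out := (PySem.List.enumerate digits).foldl
        (fun acc ic =>
          (if ic.1 ≠ 0 ∧ PySem.Int.mod (n - ic.1) 3 = 0 then acc ++ ['.'] else acc) ++ [ic.2]) []
      -- "".join(out): out is a list of single characters, so the join is String.ofList
      some (String.ofList out)

-- ===== PRECONDITION & SPEC =====
def Spec_format_pt_tax_id (value : Option String) (out : Option String) : Prop := out = format_pt_tax_id_alt value
instance (value : Option String) (out : Option String) : Decidable (Spec_format_pt_tax_id value out) := by unfold Spec_format_pt_tax_id; infer_instance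

-- ===== CLAIM (what is proved, stated in full; the proofs are below) =====
def Claim_equal_format_pt_tax_id : Prop := ∀ (value : Option String), Dom_format_pt_tax_id value → Spec_format_pt_tax_id value (format_pt_tax_id value)

-- ===== LEMMAS AND PROOFS =====

-- B's per-position contribution, as a flatMap body
def fptPiece (n : Int) (ic : Int × Char) : List Char :=
  (if ic.1 ≠ 0 ∧ PySem.Int.mod (n - ic.1) 3 = 0 then ['.'] else []) ++ [ic.2]

theorem fptFold_eq_flatMap (n : Int) (l : List (Int × Char)) :
    l.foldl (fun acc ic =>
        (if ic.1 ≠ 0 ∧ PySem.Int.mod (n - ic.1) 3 = 0 then acc ++ ['.'] else acc) ++ [ic.2]) [] =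
      l.flatMap (fptPiece n) := by
  have h : (fun (acc : List Char) (ic : Int × Char) =>
      (if ic.1 ≠ 0 ∧ PySem.Int.mod (n - ic.1) 3 = 0 then acc ++ ['.'] else acc) ++ [ic.2]) =
      (fun acc ic => acc ++ fptPiece n ic) := by
    funext acc ic
    unfold fptPiece
    by_cases hc : ic.1 ≠ 0 ∧ PySem.Int.mod (n - ic.1) 3 = 0
    · rw [if_pos hc, if_pos hc]; simp
    · rw [if_neg hc, if_neg hc]; simp
  rw [h, PySem.List.foldl_append_eq_flatMap, List.nil_append]

theorem fmod_three_add (x : Int) : (x + 3).fmod 3 = x.fmod 3 := by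
  rw [Int.fmod_eq_emod, Int.fmod_eq_emod]
  omega

theorem join_append_singleton (sep y : List Char) (xs : List (List Char)) (h : xs ≠ []) :
    PySem.Chars.join sep (xs ++ [y]) = PySem.Chars.join sep xs ++ sep ++ y := by
  induction xs with
  | nil => exact absurd rfl h
  | cons a t ih =>
    cases t with
    | nil => simp [PySem.Chars.join_cons_cons, PySem.Chars.join_singleton]
    | cons b t' =>
      rw [show ((a :: b :: t') ++ [y]) = a :: b :: (t' ++ [y]) from rfl,
        PySem.Chars.join_cons_cons,
        show ((b : List Char) :: (t' ++ [y])) = (b :: t') ++ [y] from rfl,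
        ih (by simp), PySem.Chars.join_cons_cons]
      simp

theorem flatMap_snd (l : List Char) (s : Int)
    (hall : ∀ ic ∈ PySem.List.enumerate l s, ¬ (ic.1 ≠ 0 ∧ PySem.Int.mod ((s + l.length) - ic.1) 3 = 0)) :
    (PySem.List.enumerate l s).flatMap (fptPiece (s + l.length)) = l := by
  induction l generalizing s with
  | nil => simp [PySem.List.enumerate_nil]
  | cons a t ih =>
    rw [PySem.List.enumerate_cons, List.flatMap_cons]
    have h1 := hall (s, a) (by rw [PySem.List.enumerate_cons]; exact List.mem_cons_self)
    have : fptPiece (s + (a :: t).length) (s, a) = [a] := by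
      simp only [fptPiece, if_neg h1, List.nil_append]
    rw [this]
    have ht : (PySem.List.enumerate t (s + 1)).flatMap (fptPiece ((s + 1) + t.length)) = t := by
      apply ih
      intro ic hic
      have := hall ic (by rw [PySem.List.enumerate_cons]; exact List.mem_cons_of_mem _ hic)
      have he : (s + 1) + (t.length : Int) = s + ((a :: t).length : Int) := by
        push_cast [List.length_cons]; ring
      rw [he]; exact this
    have he : (s + 1) + (t.length : Int) = s + ((a :: t).length : Int) := by
      push_cast [List.length_cons]; ring
    rw [he] at ht
    rw [ht]
    rfl

-- the main bridge: for nonempty digit lists, A's join-of-reversed-groups equals B's single pass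
theorem fpt_main (d : List Char) (hne : d ≠ []) :
    PySem.Chars.join ['.'] (fptGroups d).reverse =
      (PySem.List.enumerate d).flatMap (fptPiece d.length) := by
  induction hn : d.length using Nat.strong_induction_on generalizing d with
  | _ n ih =>
  subst hn
  have hpos : 0 < d.length := List.length_pos_of_ne_nil hne
  by_cases hle : d.length ≤ 3
  · -- one group: the whole string, no dots
    have hgroups : fptGroups d = [d] := by
      have h1 : d.length - 3 = 0 := by omega
      rw [fptGroups, dif_neg hne, h1]
      simp [fptGroups]
    rw [hgroups]
    simp only [List.reverse_cons, List.reverse_nil, List.nil_append, PySem.Chars.join_singleton]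
    have := flatMap_snd d 0 ?_
    · rw [zero_add] at this; exact this.symm
    · intro ic hic
      rw [PySem.List.mem_enumerate_iff] at hic
      obtain ⟨k, hk, hp⟩ := hic
      rintro ⟨h0, hm⟩
      rw [hp] at h0 hm
      simp only [zero_add] at h0 hm
      have hk1 : 1 ≤ k := by
        rcases Nat.eq_zero_or_pos k with h | h
        · exact absurd (by simp [h]) h0
        · exact h
      have hlt : (d.length : Int) - k < 3 ∧ 0 < (d.length : Int) - k := by
        constructor <;> omega
      have : PySem.Int.mod ((d.length : Int) - k) 3 = (d.length : Int) - k := by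
        unfold PySem.Int.mod
        rw [Int.fmod_eq_emod]
        omega
      rw [this] at hm
      omega
  · -- peel the last three characters
    rw [Nat.not_le] at hle
    set k := d.length - 3 with hkdef
    have hk1 : 1 ≤ k := by omega
    have hd : d = d.take k ++ d.drop k := (List.take_append_drop k d).symm
    have hlen_take : (d.take k).length = k := by rw [List.length_take]; omega
    have hlen_drop : (d.drop k).length = 3 := by rw [List.length_drop]; omega
    have htne : d.take k ≠ [] := by
      intro h; rw [h] at hlen_take; simp at hlen_take; omega
    -- LHS
    have hgroups : fptGroups d = d.drop k :: fptGroups (d.take k) := by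
      rw [fptGroups, dif_neg hne]
    have hgne : fptGroups (d.take k) ≠ [] := by
      rw [fptGroups, dif_neg htne]; simp
    rw [hgroups, List.reverse_cons,
      join_append_singleton _ _ _ (by simpa using hgne)]
    -- RHS: split the enumeration
    have henum : PySem.List.enumerate d =
        PySem.List.enumerate (d.take k) 0 ++ PySem.List.enumerate (d.drop k) ((0 : Int) + k) := by
      conv_lhs => rw [hd]
      rw [PySem.List.enumerate_append, hlen_take]
    rw [henum, List.flatMap_append]
    -- the last chunk has exactly three characters
    obtain ⟨a, b, c, hdrop⟩ : ∃ a b c, d.drop k = [a, b, c] := by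
      match hdk : d.drop k with
      | [a, b, c] => exact ⟨a, b, c, rfl⟩
      | [] | [_] | [_, _] | _ :: _ :: _ :: _ :: _ =>
        rw [hdk] at hlen_drop; simp at hlen_drop
    have htail : (PySem.List.enumerate (d.drop k) (0 + (k : Int))).flatMap (fptPiece d.length) =
        '.' :: d.drop k := by
      rw [hdrop]
      simp only [PySem.List.enumerate_cons, PySem.List.enumerate_nil, List.flatMap_cons,
        List.flatMap_nil, fptPiece]
      have e1 : (d.length : Int) - (0 + k) = 3 := by omega
      have e2 : (d.length : Int) - (0 + k + 1) = 2 := by omega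
      have e3 : (d.length : Int) - (0 + k + 1 + 1) = 1 := by omega
      rw [e1, e2, e3]
      have hk0 : (0 : Int) + k ≠ 0 := by omega
      rw [if_pos ⟨hk0, by decide⟩, if_neg (by rintro ⟨_, h⟩; revert h; decide),
        if_neg (by rintro ⟨_, h⟩; revert h; decide)]
      simp
    rw [htail]
    -- the head chunk: indices below k see the same condition with length replaced by k
    have hhead : (PySem.List.enumerate (d.take k) 0).flatMap (fptPiece d.length) =
        (PySem.List.enumerate (d.take k) 0).flatMap (fptPiece (d.take k).length) := by
      rw [List.flatMap, List.flatMap]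
      congr 1
      apply List.map_congr_left
      intro ic hic
      rw [PySem.List.mem_enumerate_iff] at hic
      obtain ⟨j, hj, hp⟩ := hic
      rw [hlen_take] at hj
      subst hp
      unfold fptPiece
      have : (d.length : Int) - (0 + (j : Int)) = (((d.take k).length : Int) - (0 + (j : Int))) + 3 := by
        rw [hlen_take]; omega
      rw [this]
      unfold PySem.Int.mod
      rw [fmod_three_add]
    rw [hhead, hlen_take, ← ih k (by omega) (d.take k) htne hlen_take]
    simp

-- ===== VERDICT (by name: the statement is the Claim_ definition above) =====
theorem format_pt_tax_id_spec : Claim_equal_format_pt_tax_id := by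
  intro value _
  unfold Spec_format_pt_tax_id format_pt_tax_id format_pt_tax_id_alt
  match value with
  | none => rfl
  | some v =>
    simp only
    set digits := (PySem.Str.strip v).toList.filter PySem.Chars.isdigit with hdig
    by_cases h : digits = []
    · rw [if_pos h, if_pos h]
    · rw [if_neg h, if_neg h]
      rw [fptFold_eq_flatMap, fpt_main digits h]
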